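-- pv_equiv track=rewrite | github.com/dhnesh12/codechef-solutions | 02-CodeChef-Easy/500--Palindromic Numbers.py | looking_glass_house
-- ===== SOURCE A (Python) =====
-- def is_palindrome(n, base):
--     limite_izquierdo = n//base
--     limite_derecho = n - base * limite_izquierdo
--     if limite_derecho == 0:
--         return 0
--     cota = limite_izquierdo//base
--
--     while cota > limite_derecho:
--         limite_derecho = base * (limite_derecho - cota) + limite_izquierdo
--         limite_izquierdo = cota
--         cota = limite_izquierdo//base
--     if limite_izquierdo == limite_derecho or cota == limite_derecho:
--         return True
--     return False
--
-- def looking_glass_house(n):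
--     base = 2
--     if n == 1 or n == 3:
--         return 2
--     if n == 2 or n == 4:
--         return 3
--
--     while base*base <= n:
--         if is_palindrome(n, base):
--             return base
--         base += 1
--     base -= 1
--     cota = n//base
--     while cota == base + 1 or cota * base != n:
--         base -= 1
--         cota = n//base
--     return cota - 1
-- ===== SOURCE B (Python) =====
-- def looking_glass_house(n):
--     if n == 1 or n == 3:
--         return 2
--     if n == 2 or n == 4:
--         return 3
--     base = 2
--     while base * base <= n:
--         digits = []
--         m = n
--         while m > 0:
--             digits.append(m % base)
--             m //= base
--         if digits == digits[::-1]: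
--             return base
--         base += 1
--     # no palindromic base up to isqrt(n): the answer is a two-digit palindrome
--     # "dd" in base n//d - 1 for the largest divisor d <= isqrt(n) with a valid
--     # leading digit (n//d != d + 1); d = 1 always works since "11" in base n-1.
--     s = base - 1
--     best = 1
--     for d in range(2, s + 1):
--         if n % d == 0 and n // d != d + 1:
--             best = d
--     return n // best - 1
-- ===== Notes on version B (the rewrite author's own statement) =====
-- stated objective: simpler
-- what changed: A's arithmetic half-reverse palindrome test (peeling digits from both ends with div/mod juggling) is replaced by building the base-b digit list and comparing it with its reversal, and A's downward first-hit divisor scan in the two-digit fallback is replaced by an upward pass keeping the last valid divisor.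
import Mathlib
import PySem

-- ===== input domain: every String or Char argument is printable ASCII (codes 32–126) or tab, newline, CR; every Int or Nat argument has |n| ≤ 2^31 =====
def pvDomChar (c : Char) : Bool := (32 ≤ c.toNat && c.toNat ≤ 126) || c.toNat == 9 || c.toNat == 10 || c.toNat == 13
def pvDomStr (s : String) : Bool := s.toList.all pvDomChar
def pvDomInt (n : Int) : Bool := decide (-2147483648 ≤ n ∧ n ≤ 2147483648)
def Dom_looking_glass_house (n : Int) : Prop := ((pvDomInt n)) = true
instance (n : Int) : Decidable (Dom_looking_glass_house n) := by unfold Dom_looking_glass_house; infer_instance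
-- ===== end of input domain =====

-- B replaces A's arithmetic half-reverse palindrome test by an explicit base-b digit
-- list compared with its reversal, and A's downward first-hit divisor scan in the
-- fallback by an upward fold keeping the last valid divisor (objective: simpler).

-- ===== PORT A =====

-- the while-loop of is_palindrome; fuel counts iterations (proved sufficient at the
-- call site below); on fuel exhaustion it returns the loop's exit check (unreachable)
def pvPalLoop (base : Int) : Nat → Int → Int → Bool
  | 0, L, R => (L == R || PySem.Int.floordiv L base == R)
  | fuel+1, L, R =>
      let cota := PySem.Int.floordiv L base
      if cota > R then pvPalLoop base fuel cota (base * (R - cota) + L)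
      else (L == R || cota == R)

-- is_palindrome(n, base); Python returns 0 / True / False, used only as a truth
-- value by the caller, so the port returns Bool (0 ↦ false)
def pvIsPal (n base : Int) : Bool :=
  let L := PySem.Int.floordiv n base
  let R := n - base * L
  if R == 0 then false
  else pvPalLoop base (L.natAbs + 1) L R

-- the final while-loop of looking_glass_house (base decreasing); fuel is sufficient
-- at the call site (the loop stops at base = 1); on exhaustion, the exit value
def pvFallA (n : Int) : Nat → Int → Int
  | 0, base => PySem.Int.floordiv n base - 1
  | fuel+1, base =>
      let cota := PySem.Int.floordiv n base
      if cota == base + 1 || cota * base != n then pvFallA n fuel (base - 1)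
      else cota - 1

-- the first while-loop of looking_glass_house (base increasing)
def pvScanA (n base : Int) : Int :=
  if h : base * base ≤ n then
    (if pvIsPal n base then base else pvScanA n (base + 1))
  else pvFallA n ((base - 1).natAbs + 1) (base - 1)
termination_by (n + 1 - base).toNat
decreasing_by
  have hb : base ≤ base * base := by
    rcases (by omega : 1 ≤ base ∨ base ≤ 0) with h1 | h1
    · exact le_mul_of_one_le_left (by omega) h1
    · exact le_trans h1 (mul_self_nonneg base)
  omega

def looking_glass_house (n : Int) : Int :=
  if n == 1 || n == 3 then 2
  else if n == 2 || n == 4 then 3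
  else pvScanA n 2

-- ===== PORT B =====

-- the inner digit-extraction loop of B; fuel counts iterations (sufficient at the
-- call site); ds is the accumulated digit list
def pvDigits (base : Int) : Nat → Int → List Int → List Int
  | 0, _, ds => ds
  | fuel+1, m, ds =>
      if m > 0 then pvDigits base fuel (PySem.Int.floordiv m base) (ds ++ [PySem.Int.mod m base])
      else ds

-- the outer while-loop of B plus its fallback (s = base - 1; upward fold keeps the
-- last valid divisor, starting from the always-valid 1)
def pvScanB (n base : Int) : Int :=
  if h : base * base ≤ n then
    (let ds := pvDigits base (n.natAbs + 1) n []
     if ds == (PySem.List.slice? ds none none (-1)).getD [] then base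
     else pvScanB n (base + 1))
  else
    let s := base - 1
    let best := (PySem.List.pyRange 2 (s + 1) 1).foldl
      (fun best d => if PySem.Int.mod n d == 0 && PySem.Int.floordiv n d != d + 1 then d else best) 1
    PySem.Int.floordiv n best - 1
termination_by (n + 1 - base).toNat
decreasing_by
  have hb : base ≤ base * base := by
    rcases (by omega : 1 ≤ base ∨ base ≤ 0) with h1 | h1
    · exact le_mul_of_one_le_left (by omega) h1
    · exact le_trans h1 (mul_self_nonneg base)
  omega

def looking_glass_house_alt (n : Int) : Int :=
  if n == 1 || n == 3 then 2
  else if n == 2 || n == 4 then 3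
  else pvScanB n 2

-- ===== PRECONDITION & SPEC =====
def Spec_looking_glass_house (n : Int) (out : Int) : Prop := out = looking_glass_house_alt n
instance (n : Int) (out : Int) : Decidable (Spec_looking_glass_house n out) := by unfold Spec_looking_glass_house; infer_instance

-- ===== CLAIM (what is proved, stated in full; the proofs are below) =====
def Claim_equal_looking_glass_house : Prop := ∀ (n : Int), Dom_looking_glass_house n → Spec_looking_glass_house n (looking_glass_house n)

-- ===== LEMMAS AND PROOFS =====

-- cast bridges: PySem floor-division/mod of nonnegative arguments compute in ℕ
lemma pv_fd_cast (L base : Int) (hL : 0 ≤ L) (hb : 0 < base) :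
    PySem.Int.floordiv L base = ((L.toNat / base.toNat : ℕ) : ℤ) := by
  conv_lhs => rw [← Int.toNat_of_nonneg hL, ← Int.toNat_of_nonneg hb.le]
  exact PySem.Int.floordiv_natCast _ _

lemma pv_mod_cast (L base : Int) (hL : 0 ≤ L) (hb : 0 < base) :
    PySem.Int.mod L base = ((L.toNat % base.toNat : ℕ) : ℤ) := by
  conv_lhs => rw [← Int.toNat_of_nonneg hL, ← Int.toNat_of_nonneg hb.le]
  exact PySem.Int.mod_natCast _ _

lemma pv_fd_one (n : Int) : PySem.Int.floordiv n 1 = n := by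
  rw [PySem.Int.floordiv_eq_ediv_of_pos (by norm_num)]; exact Int.ediv_one n

-- splitting a palindromic list at (or just past) its middle
lemma pv_pal_split_even (r ls : List ℕ) (h : r ++ ls = (r ++ ls).reverse)
    (hlen : ls.length = r.length) : ls = r.reverse := by
  rw [List.reverse_append] at h
  exact (List.append_inj h (by simp [hlen])).2

lemma pv_pal_split_odd (r ls : List ℕ) (h : r ++ ls = (r ++ ls).reverse)
    (hlen : ls.length = r.length + 1) : ls.tail = r.reverse := by
  obtain ⟨x, t, rfl⟩ : ∃ x t, ls = x :: t := by
    cases ls with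
    | nil => simp at hlen
    | cons a l => exact ⟨a, l, rfl⟩
  rw [List.reverse_append, List.reverse_cons, List.append_assoc] at h
  have hlt : t.length = r.length := by simp at hlen; omega
  have := (List.append_inj h (by simp [hlt])).1
  simp only [List.tail_cons]
  simp [this]

-- the half-reverse loop of A's is_palindrome decides palindromicity of the digits:
-- the state carries the already-consumed low digits r (as the reversed value R)
-- and the remaining high part L; dn is the full digit string of n
lemma pvPalLoop_spec (base : Int) (hb : 2 ≤ base) (dn : List ℕ) :
    ∀ (fuel : Nat) (L R : Int) (d0 : ℕ) (r : List ℕ),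
      1 ≤ L → r.head? = some d0 → d0 ≠ 0 → (∀ x ∈ r, x < base.toNat) →
      R = ((Nat.ofDigits base.toNat r.reverse : ℕ) : Int) →
      dn = r ++ Nat.digits base.toNat L.toNat →
      (dn = dn.reverse → r.length ≤ (Nat.digits base.toNat L.toNat).length) →
      L.toNat < fuel →
      (pvPalLoop base fuel L R = true ↔ dn = dn.reverse) := by
  intro fuel
  induction fuel with
  | zero => intro L R d0 r _ _ _ _ _ _ _ hf; omega
  | succ fuel ih =>
    intro L R d0 r hL hhead hd0 hrlt hR hdn hpalH hf
    have hb' : 2 ≤ base.toNat := by omega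
    have hbp : (0:ℤ) < base := by omega
    have hL0 : 0 ≤ L := by omega
    have hLn : 1 ≤ L.toNat := by omega
    have hcota : PySem.Int.floordiv L base = ((L.toNat / base.toNat : ℕ) : ℤ) :=
      pv_fd_cast L base hL0 hbp
    have hcnn : 0 ≤ PySem.Int.floordiv L base := by rw [hcota]; positivity
    have hctn : (PySem.Int.floordiv L base).toNat = L.toNat / base.toNat := by
      rw [hcota]; exact Int.toNat_natCast _
    have hdigL : Nat.digits base.toNat L.toNat
        = L.toNat % base.toNat :: Nat.digits base.toNat (L.toNat / base.toNat) :=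
      Nat.digits_def' (by omega) (by omega)
    have hrne : r ≠ [] := by intro e; rw [e] at hhead; simp at hhead
    have hRdig : Nat.digits base.toNat R.toNat = r.reverse := by
      rw [hR, Int.toNat_natCast]
      apply Nat.digits_ofDigits _ (by omega)
      · intro x hx; exact hrlt x (List.mem_reverse.mp hx)
      · intro hne
        have h1 : (r.reverse).getLast? = some d0 := by rw [List.getLast?_reverse, hhead]
        rw [List.getLast?_eq_some_getLast hne] at h1
        simp only [Option.some_inj] at h1
        rw [h1]; exact hd0
    have hR0 : 0 ≤ R := by rw [hR]; positivity
    have hRT : R.toNat ≠ 0 := by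
      intro e
      rw [e, Nat.digits_zero] at hRdig
      exact hrne (by simpa using hRdig.symm)
    have hR1 : 1 ≤ R := by omega
    have hRlen : R.toNat < base.toNat ^ r.length := by
      have := (Nat.digits_length_le_iff (by omega : 1 < base.toNat) R.toNat).mp
        (le_of_eq (by rw [hRdig, List.length_reverse]))
      exact this
    rw [pvPalLoop]
    by_cases hgt : R < PySem.Int.floordiv L base
    · rw [if_pos hgt]
      have hm : PySem.Int.mod L base = ((L.toNat % base.toNat : ℕ) : ℤ) :=
        pv_mod_cast L base hL0 hbp
      have hLid := PySem.Int.floordiv_mul_add_mod L base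
      apply ih (PySem.Int.floordiv L base) _ d0 (r ++ [L.toNat % base.toNat])
      · omega
      · cases r with
        | nil => exact absurd rfl hrne
        | cons a l => simpa using hhead
      · exact hd0
      · intro x hx
        rcases List.mem_append.mp hx with h | h
        · exact hrlt x h
        · simp at h; rw [h]; exact Nat.mod_lt _ (by omega)
      · rw [List.reverse_append, List.reverse_cons]
        simp only [List.reverse_nil, List.nil_append, List.singleton_append]
        rw [Nat.ofDigits_cons, Nat.cast_add, Nat.cast_mul, Int.toNat_of_nonneg hbp.le,
          ← hR, ← hm]
        linarith
      · rw [hdn, hdigL, hctn]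
        simp [List.append_assoc]
      · intro hpal
        have hac := hpalH hpal
        have hpal' : r ++ Nat.digits base.toNat L.toNat
            = (r ++ Nat.digits base.toNat L.toNat).reverse := by rw [← hdn]; exact hpal
        rw [hctn]
        by_contra hcon
        push Not at hcon
        have hlen1 : (Nat.digits base.toNat L.toNat).length
            = (Nat.digits base.toNat (L.toNat / base.toNat)).length + 1 := by
          rw [hdigL]; simp
        simp only [List.length_append, List.length_cons, List.length_nil] at hcon
        rcases (by omega : (Nat.digits base.toNat L.toNat).length = r.length
            ∨ (Nat.digits base.toNat L.toNat).length = r.length + 1) with he | ho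
        · have hev := pv_pal_split_even r _ hpal' he
          have : L.toNat = R.toNat := by
            rw [← Nat.ofDigits_digits base.toNat L.toNat, hev, hRdig.symm,
              Nat.ofDigits_digits]
          have hLR : L = R := by omega
          have : PySem.Int.floordiv L base ≤ R := by
            rw [hcota, ← hLR]
            calc ((L.toNat / base.toNat : ℕ) : ℤ) ≤ ((L.toNat : ℕ) : ℤ) := by
                  exact_mod_cast Nat.div_le_self _ _
              _ = L := by omega
          omega
        · have hod := pv_pal_split_odd r _ hpal' ho
          rw [hdigL] at hod
          simp only [List.tail_cons] at hod
          have : (PySem.Int.floordiv L base).toNat = R.toNat := by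
            rw [hctn, ← Nat.ofDigits_digits base.toNat (L.toNat / base.toNat), hod,
              hRdig.symm, Nat.ofDigits_digits]
          have : PySem.Int.floordiv L base = R := by omega
          omega
      · have := Nat.div_lt_self (by omega : 0 < L.toNat) (by omega : 1 < base.toNat)
        omega
    · rw [if_neg hgt]
      simp only [Bool.or_eq_true, beq_iff_eq]
      constructor
      · rintro (hLR | hcR)
        · have hls : Nat.digits base.toNat L.toNat = r.reverse := by
            rw [show L.toNat = R.toNat by omega, hRdig]
          rw [hdn, hls]
          simp [List.reverse_append]
        · have hls : Nat.digits base.toNat (L.toNat / base.toNat) = r.reverse := by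
            rw [← hctn, show (PySem.Int.floordiv L base).toNat = R.toNat by omega, hRdig]
          rw [hdn, hdigL, hls]
          simp [List.reverse_append]
      · intro hpal
        have hac := hpalH hpal
        have hpal' : r ++ Nat.digits base.toNat L.toNat
            = (r ++ Nat.digits base.toNat L.toNat).reverse := by rw [← hdn]; exact hpal
        have hlen1 : (Nat.digits base.toNat L.toNat).length
            = (Nat.digits base.toNat (L.toNat / base.toNat)).length + 1 := by
          rw [hdigL]; simp
        have hlen2 : (Nat.digits base.toNat L.toNat).length ≤ r.length + 1 := by
          by_contra hcon
          push Not at hcon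
          have hclen : ¬ ((Nat.digits base.toNat (L.toNat / base.toNat)).length ≤ r.length) := by
            omega
          have hge : base.toNat ^ r.length ≤ L.toNat / base.toNat := by
            by_contra hlt
            push Not at hlt
            exact hclen ((Nat.digits_length_le_iff (by omega : 1 < base.toNat) _).mpr hlt)
          have : R < PySem.Int.floordiv L base := by
            rw [hcota]
            have h1 : R < ((base.toNat ^ r.length : ℕ) : ℤ) := by
              rw [← Int.toNat_of_nonneg hR0] at *
              exact_mod_cast hRlen
            have h2 : ((base.toNat ^ r.length : ℕ) : ℤ) ≤ ((L.toNat / base.toNat : ℕ) : ℤ) := by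
              exact_mod_cast hge
            omega
          exact hgt this
        rcases (by omega : (Nat.digits base.toNat L.toNat).length = r.length
            ∨ (Nat.digits base.toNat L.toNat).length = r.length + 1) with he | ho
        · left
          have hev := pv_pal_split_even r _ hpal' he
          have : L.toNat = R.toNat := by
            rw [← Nat.ofDigits_digits base.toNat L.toNat, hev, hRdig.symm,
              Nat.ofDigits_digits]
          omega
        · right
          have hod := pv_pal_split_odd r _ hpal' ho
          rw [hdigL] at hod
          simp only [List.tail_cons] at hod
          have : (PySem.Int.floordiv L base).toNat = R.toNat := by
            rw [hctn, ← Nat.ofDigits_digits base.toNat (L.toNat / base.toNat), hod,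
              hRdig.symm, Nat.ofDigits_digits]
          omega

-- A's is_palindrome answers: "the base-b digit string of n is a palindrome"
lemma pvIsPal_iff (n base : Int) (hb : 2 ≤ base) (hn : base ≤ n) :
    (pvIsPal n base = true ↔
      Nat.digits base.toNat n.toNat = (Nat.digits base.toNat n.toNat).reverse) := by
  have hb' : 2 ≤ base.toNat := by omega
  have hn0 : 0 ≤ n := by omega
  have hn1 : 1 ≤ n.toNat := by omega
  have hbn : base.toNat ≤ n.toNat := by omega
  rw [pvIsPal]
  have hfd : PySem.Int.floordiv n base = ((n.toNat / base.toNat : ℕ) : ℤ) :=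
    pv_fd_cast n base hn0 (by omega)
  have hm : PySem.Int.mod n base = ((n.toNat % base.toNat : ℕ) : ℤ) :=
    pv_mod_cast n base hn0 (by omega)
  have hLid := PySem.Int.floordiv_mul_add_mod n base
  have hRm : n - base * PySem.Int.floordiv n base = ((n.toNat % base.toNat : ℕ) : ℤ) := by
    rw [← hm]; linarith
  have hdign : Nat.digits base.toNat n.toNat
      = n.toNat % base.toNat :: Nat.digits base.toNat (n.toNat / base.toNat) :=
    Nat.digits_def' (by omega) (by omega)
  by_cases h0 : n - base * PySem.Int.floordiv n base = 0
  · rw [if_pos (by simpa using h0)]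
    have hd00 : n.toNat % base.toNat = 0 := by
      rw [hRm] at h0; exact_mod_cast h0
    constructor
    · intro h; exact absurd h (by simp)
    · intro hpal
      exfalso
      have hne : Nat.digits base.toNat n.toNat ≠ [] :=
        Nat.digits_ne_nil_iff_ne_zero.mpr (by omega)
      have hlast : (Nat.digits base.toNat n.toNat).getLast hne ≠ 0 :=
        Nat.getLast_digit_ne_zero base.toNat (by omega)
      have hh : (Nat.digits base.toNat n.toNat).head? = some 0 := by
        rw [hdign, hd00]; rfl
      have hg : (Nat.digits base.toNat n.toNat).getLast? = some 0 := by
        rw [← List.head?_reverse, ← hpal, hh]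
      rw [List.getLast?_eq_some_getLast hne] at hg
      simp only [Option.some_inj] at hg
      exact hlast (by rw [← hg])
  · rw [if_neg (by simpa using h0)]
    have hd0ne : n.toNat % base.toNat ≠ 0 := by
      intro e
      rw [hRm, e] at h0
      exact h0 (by norm_num)
    have hL1 : 1 ≤ PySem.Int.floordiv n base := by
      rw [hfd]
      have : 1 ≤ n.toNat / base.toNat := (Nat.one_le_div_iff (by omega)).mpr hbn
      exact_mod_cast this
    rw [hRm]
    apply pvPalLoop_spec base hb (Nat.digits base.toNat n.toNat)
      ((PySem.Int.floordiv n base).natAbs + 1) (PySem.Int.floordiv n base)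
      _ (n.toNat % base.toNat) [n.toNat % base.toNat] hL1 rfl hd0ne
    · intro x hx
      simp only [List.mem_singleton] at hx
      rw [hx]
      exact Nat.mod_lt _ (by omega)
    · simp [Nat.ofDigits_singleton]
    · rw [hfd, Int.toNat_natCast, hdign]
      rfl
    · intro _
      have : Nat.digits base.toNat (PySem.Int.floordiv n base).toNat ≠ [] := by
        apply Nat.digits_ne_nil_iff_ne_zero.mpr
        omega
      have := List.length_pos_of_ne_nil this
      simpa using this
    · omega

-- B's digit loop builds exactly Nat.digits (cast to ℤ)
lemma pvDigits_eq (base : Int) (hb : 2 ≤ base) :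
    ∀ (fuel : Nat) (m : Int) (ds : List Int), 0 ≤ m → m.toNat < fuel →
      pvDigits base fuel m ds = ds ++ List.map (Nat.cast : Nat → Int) (Nat.digits base.toNat m.toNat) := by
  intro fuel
  induction fuel with
  | zero => intro m ds _ h; omega
  | succ fuel ih =>
    intro m ds hm hf
    rw [pvDigits]
    by_cases hp : 0 < m
    · rw [if_pos (by exact_mod_cast hp)]
      have hb' : 1 < base.toNat := by omega
      have hfd : 0 ≤ PySem.Int.floordiv m base := by
        rw [pv_fd_cast m base hm (by omega)]; positivity
      have hfdt : (PySem.Int.floordiv m base).toNat = m.toNat / base.toNat := by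
        rw [pv_fd_cast m base hm (by omega)]; exact Int.toNat_natCast _
      have hlt : m.toNat / base.toNat < m.toNat := Nat.div_lt_self (by omega) hb'
      rw [ih _ _ hfd (by omega)]
      rw [Nat.digits_def' hb' (by omega : 0 < m.toNat)]
      simp [hfdt, pv_mod_cast m base hm (by omega)]
    · rw [if_neg (by simpa using hp)]
      have : m.toNat = 0 := by omega
      simp [this]

-- B's palindrome test agrees with A's
lemma pvCheckB_iff (n base : Int) (hb : 2 ≤ base) (hn : 0 ≤ n) :
    ((pvDigits base (n.natAbs + 1) n [] ==
        (PySem.List.slice? (pvDigits base (n.natAbs + 1) n []) none none (-1)).getD []) = true ↔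
      Nat.digits base.toNat n.toNat = (Nat.digits base.toNat n.toNat).reverse) := by
  have hds := pvDigits_eq base hb (n.natAbs + 1) n [] hn (by omega)
  rw [PySem.List.slice?_none_none_neg_one]
  simp only [Option.getD_some, beq_iff_eq, hds, List.nil_append]
  rw [← List.map_reverse]
  exact ⟨fun h => List.map_injective_iff.mpr Nat.cast_injective h, fun h => congrArg _ h⟩

-- the divisor d is usable for the two-digit fallback: d | n and leading digit valid
def pvValidB (n d : Int) : Bool :=
  !(PySem.Int.floordiv n d == d + 1) && (PySem.Int.floordiv n d * d == n)

-- greatest usable divisor in [1, k] (1 is always usable when n ≥ 5)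
def pvM (n : Int) : Nat → Int
  | 0 => 1
  | 1 => 1
  | (k+2) => if pvValidB n (k+2) then ((k : Int) + 2) else pvM n (k+1)

-- unfolding pvM at an argument ≥ 2
lemma pvM_step (n : Int) (j : Nat) :
    pvM n (j + 2) = if pvValidB n ((j : Int) + 2) then ((j : Int) + 2) else pvM n (j + 1) := by
  rw [pvM]

-- A's loop-exit test and B's fold test are the same divisor condition
lemma pv_cond_eq (n d : Int) :
    (PySem.Int.mod n d == 0 && PySem.Int.floordiv n d != d + 1) = pvValidB n d := by
  have h := PySem.Int.floordiv_mul_add_mod n d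
  have hiff : (PySem.Int.mod n d = 0) ↔ (PySem.Int.floordiv n d * d = n) := by
    constructor <;> intro <;> linarith
  rw [Bool.eq_iff_iff]
  simp only [pvValidB, Bool.and_eq_true, beq_iff_eq, bne_iff_ne, ne_eq, Bool.not_eq_true',
    beq_eq_false_iff_ne]
  tauto

-- A's fallback loop returns n // (greatest usable divisor ≤ base) - 1
lemma pvFallA_eq (n : Int) (hn : 5 ≤ n) :
    ∀ (fuel : Nat) (base : Int), 1 ≤ base → base.toNat < fuel →
      pvFallA n fuel base = PySem.Int.floordiv n (pvM n base.toNat) - 1 := by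
  intro fuel
  induction fuel with
  | zero => intro base _ h; omega
  | succ fuel ih =>
    intro base hb1 hf
    rw [pvFallA]
    have hcond : (PySem.Int.floordiv n base == base + 1 || PySem.Int.floordiv n base * base != n)
        = !pvValidB n base := by
      rw [pvValidB, Bool.not_and, Bool.not_not]
      rfl
    rcases (by omega : base = 1 ∨ 2 ≤ base) with rfl | hb2
    · have hv : pvValidB n 1 = true := by
        rw [pvValidB]
        simp
        omega
      rw [hcond, hv]
      simp only [Bool.not_true, Bool.false_eq_true, if_false]
      norm_num [pvM, pv_fd_one]
    · obtain ⟨j, hj⟩ : ∃ j, base.toNat = j + 2 := ⟨base.toNat - 2, by omega⟩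
      have hcast : ((j : Int) + 2) = base := by omega
      rw [hcond, hj, pvM_step, hcast]
      cases hv : pvValidB n base with
      | true => simp
      | false =>
        simp only [Bool.not_false, if_true, Bool.false_eq_true, if_false]
        rw [ih (base - 1) (by omega) (by omega), show (base - 1).toNat = j + 1 by omega]
      
-- B's upward fold computes the same greatest usable divisor
lemma pvFoldB_aux (n : Int) : ∀ (j : Nat),
    (PySem.List.pyRange 2 (((j : Int) + 1) + 1) 1).foldl
      (fun best d => if PySem.Int.mod n d == 0 && PySem.Int.floordiv n d != d + 1 then d else best) 1
      = pvM n (j + 1) := by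
  intro j
  induction j with
  | zero => norm_num [(by rfl : PySem.List.pyRange 2 2 1 = ([] : List Int)), pvM]
  | succ j ih =>
    have hsplit : PySem.List.pyRange 2 (((j : Int) + 1 + 1) + 1) 1
        = PySem.List.pyRange 2 ((j : Int) + 1 + 1) 1 ++ [(j : Int) + 2] := by
      have := PySem.List.pyRange_one_succ_right (a := 2) (b := (j : Int) + 2) (by omega)
      convert this using 2
    push_cast
    rw [hsplit, List.foldl_append, ih]
    simp only [List.foldl_cons, List.foldl_nil]
    rw [pv_cond_eq, pvM_step]

lemma pvFoldB_eq (n : Int) (s : Int) (h1 : 1 ≤ s) :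
    (PySem.List.pyRange 2 (s + 1) 1).foldl
      (fun best d => if PySem.Int.mod n d == 0 && PySem.Int.floordiv n d != d + 1 then d else best) 1
      = pvM n s.toNat := by
  obtain ⟨j, hj⟩ : ∃ j : Nat, s = (j : Int) + 1 := ⟨s.toNat - 1, by omega⟩
  subst hj
  rw [show ((j : Int) + 1).toNat = j + 1 by omega]
  exact pvFoldB_aux n j

-- both fallback (else) branches compute the same value
lemma pv_else_eq (n base : Int) (hn : 5 ≤ n) (hb : 2 ≤ base) :
    pvFallA n ((base - 1).natAbs + 1) (base - 1) =
      PySem.Int.floordiv n ((PySem.List.pyRange 2 ((base - 1) + 1) 1).foldl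
        (fun best d => if PySem.Int.mod n d == 0 && PySem.Int.floordiv n d != d + 1 then d else best) 1) - 1 := by
  rw [pvFallA_eq n hn _ (base - 1) (by omega) (by omega), pvFoldB_eq n (base - 1) (by omega)]

-- the two outer scans agree for n ≥ 5
lemma pvScan_eq (n : Int) (hn : 5 ≤ n) :
    ∀ (k : Nat) (base : Int), 2 ≤ base → (n + 1 - base).toNat ≤ k →
      pvScanA n base = pvScanB n base := by
  intro k
  induction k with
  | zero =>
    intro base hb hk
    have hbn : ¬ (base * base ≤ n) := by
      intro hc
      have : base * 1 ≤ base * base := by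
        apply mul_le_mul_of_nonneg_left (by omega) (by omega)
      omega
    rw [pvScanA, pvScanB, dif_neg hbn, dif_neg hbn]
    exact pv_else_eq n base hn hb
  | succ k ih =>
    intro base hb hk
    rw [pvScanA, pvScanB]
    by_cases hc : base * base ≤ n
    · rw [dif_pos hc, dif_pos hc]
      have hbase_n : base ≤ n := by
        have : base * 1 ≤ base * base := by
          apply mul_le_mul_of_nonneg_left (by omega) (by omega)
        omega
      have heq : pvIsPal n base =
          (pvDigits base (n.natAbs + 1) n [] ==
            (PySem.List.slice? (pvDigits base (n.natAbs + 1) n []) none none (-1)).getD []) := by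
        rw [Bool.eq_iff_iff, pvIsPal_iff n base hb hbase_n, pvCheckB_iff n base hb (by omega)]
      dsimp only
      rw [← heq]
      cases hp : pvIsPal n base with
      | true => simp
      | false =>
        simp only [Bool.false_eq_true, if_false]
        exact ih (base + 1) (by omega) (by omega)
    · rw [dif_neg hc, dif_neg hc]
      exact pv_else_eq n base hn hb

lemma pv_low (n : Int) (hn : n ≤ 0) : pvScanA n 2 = pvScanB n 2 := by
  rw [pvScanA, pvScanB]
  rw [dif_neg (by omega : ¬ ((2:ℤ) * 2 ≤ n)), dif_neg (by omega : ¬ ((2:ℤ) * 2 ≤ n))]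
  show pvFallA n _ 1 = _
  rw [pvFallA]
  simp only [pv_fd_one]
  rw [if_neg (by simp; omega)]
  show _ = PySem.Int.floordiv n ((PySem.List.pyRange 2 (1+1) 1).foldl _ 1) - 1
  norm_num [(by rfl : PySem.List.pyRange 2 2 1 = ([] : List Int)), pv_fd_one]

-- ===== VERDICT (by name: the statement is the Claim_ definition above) =====
theorem looking_glass_house_spec : Claim_equal_looking_glass_house := by
  intro n _
  unfold Spec_looking_glass_house looking_glass_house looking_glass_house_alt
  rcases (by omega : n ≤ 0 ∨ 0 < n) with h | h
  · simp only [beq_iff_eq, Bool.or_eq_true]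
    rw [if_neg (by omega), if_neg (by omega), if_neg (by omega), if_neg (by omega)]
    exact pv_low n h
  · by_cases h1 : n = 1 ∨ n = 3
    · rcases h1 with rfl | rfl <;> rfl
    · by_cases h2 : n = 2 ∨ n = 4
      · rcases h2 with rfl | rfl <;> rfl
      · simp only [beq_iff_eq, Bool.or_eq_true]
        rw [if_neg (by omega), if_neg (by omega), if_neg (by omega), if_neg (by omega)]
        exact pvScan_eq n (by omega) (n + 1 - 2).toNat 2 (by omega) le_rfl
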